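-- pv_equiv track=rewrite | github.com/meni0419/Python_fundamentals | PRACTICUM/practicum_7/pr7_6.py | sum_array_p7_6_v2
-- ===== SOURCE A (Python) =====
-- def sum_array_p7_6_v2(array):
--     if len(array) == 0:
--         return 0
--     elif 13 not in array:
--         return sum(array)
--     else:
--         sum_array = 0
--         for i in range(len(array)):
--             if array[i] == 13:
--                 return sum_array
--             sum_array += array[i]
-- ===== SOURCE B (Python) =====
-- def sum_array_p7_6_v2(array):
--     try:
--         return sum(array[:array.index(13)])
--     except ValueError:
--         return sum(array)
-- ===== Notes on version B (the rewrite author's own statement) =====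
-- stated objective: idiomatic
-- what changed: Replaced A's empty-check plus membership test plus indexed accumulating loop by index()+slice+builtin sum: locate the first 13 (ValueError means none), then sum the prefix slice, with no hand-written loop.
import Mathlib
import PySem

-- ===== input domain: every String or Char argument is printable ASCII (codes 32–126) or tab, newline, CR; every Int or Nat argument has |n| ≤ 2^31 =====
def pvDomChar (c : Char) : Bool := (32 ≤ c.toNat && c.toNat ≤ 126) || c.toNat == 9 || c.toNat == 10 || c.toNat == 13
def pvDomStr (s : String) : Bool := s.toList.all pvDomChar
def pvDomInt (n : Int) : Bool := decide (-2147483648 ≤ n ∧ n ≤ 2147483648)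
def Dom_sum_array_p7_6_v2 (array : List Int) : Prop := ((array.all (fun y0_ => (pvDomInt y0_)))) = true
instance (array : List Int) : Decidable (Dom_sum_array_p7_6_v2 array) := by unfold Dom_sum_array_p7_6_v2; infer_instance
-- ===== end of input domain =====

-- B replaces A's empty-check + membership test + indexed accumulating loop by
-- index()+slice+builtin sum, with no hand-written loop (idiomatic).

-- ===== PORT A =====
-- A's indexed for-loop with early return; the base case (index past the end) is
-- only reached when no 13 was seen, and in A's else-branch 13 is guaranteed
-- present, so Python's implicit `return None` there is never taken; we return acc.
def pvALoop (array : List Int) (i : Nat) (acc : Int) : Int :=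
  if _h : i < array.length then
    if array.getD i 0 = 13 then acc
    else pvALoop array (i + 1) (acc + array.getD i 0)
  else acc
termination_by array.length - i

def sum_array_p7_6_v2 (array : List Int) : Int :=
  if array.length = 0 then 0
  else if ¬ (13 ∈ array) then array.sum
  else pvALoop array 0 0

-- ===== PORT B =====
-- try: return sum(array[:array.index(13)])  /  except ValueError: return sum(array)
def sum_array_p7_6_v2_alt (array : List Int) : Int :=
  match PySem.List.index? array 13 with
  | some i => (PySem.List.slice array none (some (i : Int))).sum
  | none => array.sum

-- ===== PRECONDITION & SPEC =====
def Spec_sum_array_p7_6_v2 (array : List Int) (out : Int) : Prop := out = sum_array_p7_6_v2_alt array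
instance (array : List Int) (out : Int) : Decidable (Spec_sum_array_p7_6_v2 array out) := by unfold Spec_sum_array_p7_6_v2; infer_instance

-- ===== CLAIM (what is proved, stated in full; the proofs are below) =====
def Claim_equal_sum_array_p7_6_v2 : Prop := ∀ (array : List Int), Dom_sum_array_p7_6_v2 array → Spec_sum_array_p7_6_v2 array (sum_array_p7_6_v2 array)

-- ===== LEMMAS AND PROOFS =====

-- sum of the prefix strictly before the first 13 (characterisation of A's loop)
def pvSumTil (l : List Int) : Int :=
  match l with
  | [] => 0
  | x :: xs => if x = 13 then 0 else x + pvSumTil xs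

theorem pvALoop_eq_sumTil (array : List Int) (i : Nat) (acc : Int) :
    pvALoop array i acc = acc + pvSumTil (array.drop i) := by
  by_cases h : i < array.length
  · have hdrop : array.drop i = array[i] :: array.drop (i + 1) :=
      List.drop_eq_getElem_cons h
    have hgd : array.getD i 0 = array[i] := List.getD_eq_getElem _ _ h
    rw [pvALoop, hdrop]
    by_cases h13 : array[i] = 13
    · simp [h, h13, pvSumTil]
    · simp [h, h13, pvSumTil,
        pvALoop_eq_sumTil array (i + 1) (acc + array[i])]
      ring
  · have : array.drop i = [] := List.drop_eq_nil_of_le (by omega)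
    rw [pvALoop, this]
    simp [h, pvSumTil]
termination_by array.length - i

theorem pvSumTil_append_cons (pre suf : List Int) (h : 13 ∉ pre) :
    pvSumTil (pre ++ 13 :: suf) = pre.sum := by
  induction pre with
  | nil => simp [pvSumTil]
  | cons x xs ih =>
    have hx : x ≠ 13 := fun hx => h (by simp [hx])
    have hxs : 13 ∉ xs := fun hm => h (by simp [hm])
    simp [pvSumTil, hx, ih hxs]

-- ===== VERDICT (by name: the statement is the Claim_ definition above) =====
theorem sum_array_p7_6_v2_spec : Claim_equal_sum_array_p7_6_v2 := by
  intro array _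
  unfold Spec_sum_array_p7_6_v2 sum_array_p7_6_v2 sum_array_p7_6_v2_alt
  by_cases hmem : 13 ∈ array
  · have hne : array.length ≠ 0 := by
      intro h0
      rw [List.eq_nil_of_length_eq_zero h0] at hmem
      simp at hmem
    have hs : (PySem.List.index? array 13).isSome :=
      (PySem.List.index?_isSome_iff array 13).mpr hmem
    obtain ⟨i, hi'⟩ := Option.isSome_iff_exists.mp hs
    obtain ⟨pre, suf, harr, hlen, hpre⟩ :=
      (PySem.List.index?_eq_some_iff array 13 _).mp hi'
    have htake : array.take i = pre := by
      rw [harr, ← hlen, List.take_left]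
    rw [hi', if_neg hne, if_neg (fun h => h hmem)]
    show pvALoop array 0 0 = (PySem.List.slice array none (some (i : Int))).sum
    rw [PySem.List.slice_to_natCast, pvALoop_eq_sumTil array 0 0,
      List.drop_zero, htake, harr, pvSumTil_append_cons pre suf hpre]
    simp
  · rw [(PySem.List.index?_eq_none_iff array 13).mpr hmem]
    by_cases h0 : array.length = 0
    · rw [List.eq_nil_of_length_eq_zero h0]; simp
    · simp [h0, hmem]
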